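-- pv_equiv track=rewrite | github.com/mtguerreiro/serialp | serialp/conversions.py | u32_to_u8
-- ===== SOURCE A (Python) =====
-- def u32_to_u8(d, msb=False):
--     """Converts a 32-bit value to a list with 4 bytes.
--
--     Parameters
--     ----------
--     d : int
--         32-bit value.
--
--     msb : bool
--         Defines if the first element of the resulting list should be the most
--         significant byte. By default, it is `False`.
--
--     Returns
--     -------
--     list
--         List with decimals.
--
--     """
--     if type(d) is int:
--         d = [d]
--
--     if msb is False:
--         data = [[(i >> (8 * k)) & 0xFF for k in range(4)] for i in d]
--     else:
--         data = [[(i >> (8 * (3-k))) & 0xFF for k in range(4)] for i in d]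
--
--     if len(data) == 1:
--         data = data[0]
--
--     return data
-- ===== SOURCE B (Python) =====
-- def u32_to_u8(d, msb=False):
--     if type(d) is int:
--         d = [d]
--
--     data = [list((i & 0xFFFFFFFF).to_bytes(4, 'big' if msb else 'little'))
--             for i in d]
--
--     if len(data) == 1:
--         data = data[0]
--
--     return data
-- ===== Notes on version B (the rewrite author's own statement) =====
-- stated objective: idiomatic
-- what changed: The per-byte shift-and-mask comprehension over bit positions is replaced by a single 32-bit mask followed by int.to_bytes(4, 'little'/'big'), which yields the 4 bytes directly with the byte order chosen by the endianness argument.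
import Mathlib
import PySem

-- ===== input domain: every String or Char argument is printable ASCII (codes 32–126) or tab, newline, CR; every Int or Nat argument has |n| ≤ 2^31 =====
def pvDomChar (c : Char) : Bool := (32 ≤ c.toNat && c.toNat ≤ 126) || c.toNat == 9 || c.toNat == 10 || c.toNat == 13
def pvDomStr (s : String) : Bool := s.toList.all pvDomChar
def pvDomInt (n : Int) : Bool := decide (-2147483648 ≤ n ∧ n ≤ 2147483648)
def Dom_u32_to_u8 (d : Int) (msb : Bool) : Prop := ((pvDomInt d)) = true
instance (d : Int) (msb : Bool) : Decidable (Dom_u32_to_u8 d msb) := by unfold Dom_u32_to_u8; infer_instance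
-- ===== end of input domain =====

-- B replaces A's per-bit shift-and-mask comprehension by a single 32-bit mask
-- plus base-256 digit extraction (Python int.to_bytes); same results, plainer code.

-- ===== PORT A =====
-- A wraps an int argument into a one-element list, builds a list of 4-byte rows
-- by shifting and masking, then flattens the single row.  Since d : Int here, the
-- wrap always produces [d] and len(data) == 1 always holds; the unreachable
-- 'else' branch (returning a list of lists) is represented by [].
def u32_to_u8 (d : Int) (msb : Bool) : List Int :=
  let ds : List Int := [d]
  let data : List (List Int) :=
    if msb = false then
      ds.map (fun i => (PySem.List.pyRange 0 4 1).map
        (fun k => PySem.Int.band (i >>> (8 * k).toNat) 0xFF))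
    else
      ds.map (fun i => (PySem.List.pyRange 0 4 1).map
        (fun k => PySem.Int.band (i >>> (8 * (3 - k)).toNat) 0xFF))
  if data.length = 1 then data.headD [] else []

-- ===== PORT B =====
-- (i & 0xFFFFFFFF).to_bytes(4, 'little'/'big'): the four base-256 digits of the
-- masked value, least-significant first for 'little', reversed for 'big'.
def pyToBytes4 (m : Int) (big : Bool) : List Int :=
  let le : List Int :=
    [PySem.Int.mod m 256,
     PySem.Int.mod (PySem.Int.floordiv m 256) 256,
     PySem.Int.mod (PySem.Int.floordiv m 65536) 256,
     PySem.Int.mod (PySem.Int.floordiv m 16777216) 256]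
  if big then le.reverse else le

def u32_to_u8_alt (d : Int) (msb : Bool) : List Int :=
  let ds : List Int := [d]
  let data : List (List Int) :=
    ds.map (fun i => pyToBytes4 (PySem.Int.band i 0xFFFFFFFF) msb)
  if data.length = 1 then data.headD [] else []

-- ===== PRECONDITION & SPEC =====
def Spec_u32_to_u8 (d : Int) (msb : Bool) (out : List Int) : Prop := out = u32_to_u8_alt d msb
instance (d : Int) (msb : Bool) (out : List Int) : Decidable (Spec_u32_to_u8 d msb out) := by unfold Spec_u32_to_u8; infer_instance

-- ===== CLAIM (what is proved, stated in full; the proofs are below) =====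
def Claim_equal_u32_to_u8 : Prop := ∀ (d : Int) (msb : Bool), Dom_u32_to_u8 d msb → Spec_u32_to_u8 d msb (u32_to_u8 d msb)

-- ===== LEMMAS AND PROOFS =====

-- Python's  a & 0xFF  equals  a % 256  (floor mod) for every Int a.
lemma band_255 (a : Int) : PySem.Int.band a 255 = a % 256 := by
  unfold PySem.Int.band
  by_cases ha : 0 ≤ a
  · simp only [ha, if_true, if_pos (by norm_num : (0:Int) ≤ 255)]
    have h : a.toNat &&& (255:Int).toNat = a.toNat % 256 := by
      have := Nat.and_two_pow_sub_one_eq_mod a.toNat 8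
      norm_num at this ⊢; exact this
    rw [h]; omega
  · simp only [ha, if_false, if_pos (by norm_num : (0:Int) ≤ 255)]
    have h : (255:Int).toNat &&& (-a - 1).toNat = (-a - 1).toNat % 256 := by
      have := Nat.and_two_pow_sub_one_eq_mod (-a - 1).toNat 8
      rw [Nat.land_comm] at this
      norm_num at this ⊢; exact this
    rw [h]; omega

-- Python's  a & 0xFFFFFFFF  equals  a % 2^32  for every Int a.
lemma band_mask32 (a : Int) : PySem.Int.band a 4294967295 = a % 4294967296 := by
  unfold PySem.Int.band
  by_cases ha : 0 ≤ a
  · simp only [ha, if_true, if_pos (by norm_num : (0:Int) ≤ 4294967295)]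
    have h : a.toNat &&& (4294967295:Int).toNat = a.toNat % 4294967296 := by
      have := Nat.and_two_pow_sub_one_eq_mod a.toNat 32
      norm_num at this ⊢; exact this
    rw [h]; omega
  · simp only [ha, if_false, if_pos (by norm_num : (0:Int) ≤ 4294967295)]
    have h : (4294967295:Int).toNat &&& (-a - 1).toNat = (-a - 1).toNat % 4294967296 := by
      have := Nat.and_two_pow_sub_one_eq_mod (-a - 1).toNat 32
      rw [Nat.land_comm] at this
      norm_num at this ⊢; exact this
    rw [h]; omega

-- ===== VERDICT (by name: the statement is the Claim_ definition above) =====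
theorem u32_to_u8_spec : Claim_equal_u32_to_u8 := by
  intro d msb _
  unfold Spec_u32_to_u8
  have hr : PySem.List.pyRange 0 4 1 = [0, 1, 2, 3] := by decide
  cases msb <;>
    simp only [u32_to_u8, u32_to_u8_alt, pyToBytes4, hr, List.map, List.reverse,
      if_true, if_false, Bool.false_eq_true, List.length, List.headD,
      band_mask32, band_255,
      PySem.Int.mod_eq_emod_of_pos (by norm_num : (0:Int) < 256),
      PySem.Int.floordiv_eq_ediv_of_pos (by norm_num : (0:Int) < 256),
      PySem.Int.floordiv_eq_ediv_of_pos (by norm_num : (0:Int) < 65536),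
      PySem.Int.floordiv_eq_ediv_of_pos (by norm_num : (0:Int) < 16777216),
      Int.shiftRight_eq_div_pow] <;>
    norm_num [show ((0:Int)).toNat = 0 from rfl, show ((8:Int)).toNat = 8 from rfl,
      show ((16:Int)).toNat = 16 from rfl, show ((24:Int)).toNat = 24 from rfl] <;> omega
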